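-- pv_equiv track=rewrite | github.com/kamal242/Spark_coding_framework | mask_num_mail.py | mask_email
-- ===== SOURCE A (Python) =====
-- def mask_email(col_email):
--     usr = col_email.split("@")[0]
--     charList = list(usr)
--     mask_mail = ''
--     for i,ch in enumerate (charList):
--         if (i == 0) or (i==len(charList)-1):
--             mask_mail += ch
--         else:
--             mask_mail += '*'
--     return mask_mail+'@'+col_email.split("@")[1]
-- ===== SOURCE B (Python) =====
-- def mask_email(col_email):
--     parts = col_email.split("@")
--     usr = parts[0]
--     masked = usr if len(usr) < 2 else usr[0] + '*' * (len(usr) - 2) + usr[-1]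
--     return masked + '@' + parts[1]
-- ===== Notes on version B (the rewrite author's own statement) =====
-- stated objective: simpler
-- what changed: Replaces the per-character enumerate loop with string concatenation by a closed-form build: first char + '*'*(len-2) + last char, with a single length<2 guard.
import Mathlib
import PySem

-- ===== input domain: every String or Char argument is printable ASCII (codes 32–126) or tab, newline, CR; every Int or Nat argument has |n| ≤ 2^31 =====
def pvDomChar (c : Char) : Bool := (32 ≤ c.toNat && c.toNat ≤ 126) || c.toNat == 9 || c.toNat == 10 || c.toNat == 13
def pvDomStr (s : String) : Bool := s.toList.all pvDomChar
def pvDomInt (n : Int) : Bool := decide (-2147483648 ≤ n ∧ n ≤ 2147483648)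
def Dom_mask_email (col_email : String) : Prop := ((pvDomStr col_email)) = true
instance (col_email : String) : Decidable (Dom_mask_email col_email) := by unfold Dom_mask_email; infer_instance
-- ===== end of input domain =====

-- B replaces A's per-character enumerate loop by a closed-form build (first char, '*' × (len-2), last char); simpler, no speed claim.

-- ===== PORT A =====
-- A's loop: for i,ch in enumerate(charList): append ch at i==0 or i==len-1, '*' otherwise.
def mask_email (col_email : String) : String :=
  let parts := PySem.Chars.splitOn col_email.toList "@".toList
  let usr := (PySem.List.pyGet? parts 0).getD []      -- split("@")[0]; a split result is never empty
  let charList := usr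
  let mask_mail :=
    (PySem.List.enumerate charList).foldl
      (fun acc p =>
        if p.1 = 0 ∨ p.1 = (charList.length : Int) - 1 then acc ++ [p.2] else acc ++ ['*'])
      []
  -- split("@")[1] raises IndexError when no '@'; Pre_ excludes that input
  String.ofList (mask_mail ++ '@' :: (PySem.List.pyGet? parts 1).getD [])

-- ===== PORT B =====
def mask_email_alt (col_email : String) : String :=
  let parts := PySem.Chars.splitOn col_email.toList "@".toList
  let usr := (PySem.List.pyGet? parts 0).getD []
  let masked :=
    if usr.length < 2 then usr
    else (PySem.List.pyGet? usr 0).toList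
         ++ List.replicate (usr.length - 2) '*'
         ++ (PySem.List.pyGet? usr (-1)).toList
  String.ofList (masked ++ '@' :: (PySem.List.pyGet? parts 1).getD [])

-- ===== PRECONDITION & SPEC =====
-- Pre_ excludes exactly the inputs with no '@' (a one-piece split), on which A's col_email.split("@")[1] raises IndexError.
def Pre_mask_email (col_email : String) : Prop :=
  1 < (PySem.Chars.splitOn col_email.toList "@".toList).length
instance (col_email : String) : Decidable (Pre_mask_email col_email) := by unfold Pre_mask_email; infer_instance
def pvWitness_mask_email : String := "alice@mail.com"

def Spec_mask_email (col_email : String) (out : String) : Prop := out = mask_email_alt col_email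
instance (col_email : String) (out : String) : Decidable (Spec_mask_email col_email out) := by unfold Spec_mask_email; infer_instance

-- ===== CLAIM (what is proved, stated in full; the proofs are below) =====
def Claim_equal_mask_email : Prop := ∀ (col_email : String), Dom_mask_email col_email → Pre_mask_email col_email → Spec_mask_email col_email (mask_email col_email)

-- ===== LEMMAS AND PROOFS =====

theorem pyGet?_zero_of_ne_nil {α : Type} (l : List α) (h : l ≠ []) :
    PySem.List.pyGet? l 0 = some (l.head h) := by
  rw [show (0 : Int) = ((0 : Nat) : Int) from rfl, PySem.List.pyGet?_natCast]
  cases l with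
  | nil => exact absurd rfl h
  | cons a t => rfl

theorem pyGet?_neg_one {α : Type} (l : List α) (h : 1 ≤ l.length) :
    PySem.List.pyGet? l (-1) = some (l[l.length - 1]'(by omega)) := by
  unfold PySem.List.pyGet? PySem.List.pyIdx?
  rw [if_neg (by norm_num), if_pos (by omega : -(l.length : Int) ≤ -1)]
  simp only [Option.bind]
  rw [List.getElem?_eq_getElem (by omega)]
  norm_num

theorem elem_closed_form (a b : Char) (n j : Nat) (h2 : 2 ≤ n) (hj : j < n)
    (hlen : j < ([a] ++ List.replicate (n-2) '*' ++ [b]).length) :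
    ([a] ++ List.replicate (n-2) '*' ++ [b])[j] = if j = 0 then a else if j = n-1 then b else '*' := by
  by_cases hj0 : j = 0
  · subst hj0; simp
  · by_cases hjl : j = n - 1
    · rw [if_neg hj0, if_pos hjl]
      rw [List.getElem_append_right (by simp; omega)]
      simp
    · rw [if_neg hj0, if_neg hjl]
      rw [List.getElem_append_left (by simp; omega)]
      rw [List.getElem_append_right (by simp; omega)]
      simp

-- A's enumerate loop over a list equals B's closed form.
theorem mask_loop_closed (l : List Char) :
    (PySem.List.enumerate l).foldl
      (fun acc p => if p.1 = 0 ∨ p.1 = (l.length : Int) - 1 then acc ++ [p.2] else acc ++ ['*']) []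
    = (if l.length < 2 then l
       else (PySem.List.pyGet? l 0).toList
            ++ List.replicate (l.length - 2) '*'
            ++ (PySem.List.pyGet? l (-1)).toList) := by
  have hbody : (fun (acc : List Char) (p : Int × Char) =>
      if p.1 = 0 ∨ p.1 = (l.length : Int) - 1 then acc ++ [p.2] else acc ++ ['*'])
      = fun acc p => acc ++ (if p.1 = 0 ∨ p.1 = (l.length : Int) - 1 then [p.2] else ['*']) := by
    funext acc p; split_ifs <;> rfl
  rw [hbody, PySem.List.foldl_append_eq_flatMap]
  by_cases hs : l.length < 2
  · rw [if_pos hs]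
    match l, hs with
    | [], _ => rfl
    | [a], _ => simp [PySem.List.enumerate]
  · rw [if_neg hs]
    rw [Nat.not_lt] at hs
    have hne : l ≠ [] := by intro h; subst h; simp at hs
    rw [pyGet?_zero_of_ne_nil l hne, pyGet?_neg_one l (by omega)]
    have hmap : (PySem.List.enumerate l).flatMap
        (fun p => if p.1 = 0 ∨ p.1 = (l.length : Int) - 1 then [p.2] else ['*'])
        = (PySem.List.enumerate l).map
            (fun p => if p.1 = 0 ∨ p.1 = (l.length : Int) - 1 then p.2 else '*') := by
      generalize PySem.List.enumerate l = L
      induction L with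
      | nil => rfl
      | cons p t ih => simp only [List.flatMap_cons, List.map_cons, ih]; split_ifs <;> rfl
    rw [hmap]
    simp only [Option.toList_some]
    apply List.ext_getElem
    · simp [PySem.List.length_enumerate]; omega
    · intro j hj₁ hj₂
      have hjlen : j < l.length := by
        simpa [PySem.List.length_enumerate] using hj₁
      simp only [List.nil_append] at hj₁ ⊢
      rw [List.getElem_map, PySem.List.getElem_enumerate, elem_closed_form (l.head hne)
            (l[l.length - 1]'(by omega)) l.length j (by omega) hjlen hj₂]
      by_cases hj0 : j = 0
      · subst hj0
        rw [if_pos (Or.inl (by norm_num)), if_pos rfl]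
        simp [List.head_eq_getElem]
      · by_cases hjl : j = l.length - 1
        · rw [if_pos (Or.inr (by omega)), if_neg hj0, if_pos hjl]
          show l[j] = l[l.length - 1]
          congr 1
        · rw [if_neg (by omega), if_neg hj0, if_neg hjl]

-- ===== VERDICT (by name: the statement is the Claim_ definition above) =====
theorem mask_email_spec : Claim_equal_mask_email := by
  intro col_email _ _
  show mask_email col_email = mask_email_alt col_email
  simp only [mask_email, mask_email_alt]
  rw [mask_loop_closed]
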